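-- pv_equiv track=rewrite | github.com/jdarguello/FEM | Teoría/Jupyter/App/FDM/.ipynb_checkpoints/order-checkpoint.py | progresiva
-- ===== SOURCE A (Python) =====
-- def progresiva(n):
--     res = {
--         'Etapas':{
--             -1:{
--                 0:1
--             }
--         }
--     }
--     for i in range(n):
--         res['Etapas'][i] = {}
--         for c in res['Etapas'][i-1]:
--             if c in res['Etapas'][i]:
--                 res['Etapas'][i][c] += (-1)*res['Etapas'][i-1][c]
--             else:
--                 res['Etapas'][i][c] = (-1)*res['Etapas'][i-1][c]
--             if c+1 in res['Etapas'][i-1]: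
--                 res['Etapas'][i][c+1] = res['Etapas'][i-1][c]
--             else:
--                 res['Etapas'][c][c+1] = 1
--     return res['Etapas']
-- ===== SOURCE B (Python) =====
-- def progresiva(n):
--     # Each stage i holds the signed difference coefficients {k: (-1)**(i+1-k) * C(i+1, k)},
--     # computed directly per stage (running-product binomial), no previous-stage convolution.
--     etapas = {-1: {0: 1}}
--     for i in range(n):
--         row = {}
--         c = 1  # c == C(i+1, k), maintained multiplicatively
--         for k in range(i + 2):
--             row[k] = c if (i + 1 - k) % 2 == 0 else -c
--             c = c * (i + 1 - k) // (k + 1)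
--         etapas[i] = row
--     return etapas
-- ===== Notes on version B (the rewrite author's own statement) =====
-- stated objective: simpler
-- what changed: Each stage's coefficients are computed directly as signed binomial coefficients of the stage index via a running product, instead of convolving the previous stage's dict with a signed kernel; no cross-stage dependence and no contains-branching.
import Mathlib
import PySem

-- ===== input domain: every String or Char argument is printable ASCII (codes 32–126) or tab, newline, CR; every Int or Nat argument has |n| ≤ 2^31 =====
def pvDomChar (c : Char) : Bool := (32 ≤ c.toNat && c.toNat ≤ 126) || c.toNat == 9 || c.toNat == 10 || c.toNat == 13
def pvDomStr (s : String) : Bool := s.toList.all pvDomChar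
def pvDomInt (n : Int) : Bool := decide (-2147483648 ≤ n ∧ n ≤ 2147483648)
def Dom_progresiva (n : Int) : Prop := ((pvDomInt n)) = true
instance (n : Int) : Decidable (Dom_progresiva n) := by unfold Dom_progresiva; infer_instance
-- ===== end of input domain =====

-- B computes each stage directly as signed binomials instead of A's stage-to-stage convolution; same values, simpler.

-- ===== PORT A =====
-- A's indexings res['Etapas'][x] are ported with getD: every key looked up is present at that
-- point (stage i is inserted just before it is read; c is always a key of stage i-1 and a stage
-- index), so getD agrees with Python's [] and no KeyError occurs.
def progAInner (et : PySem.Dict Int (PySem.Dict Int Int)) (i c : Int) :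
    PySem.Dict Int (PySem.Dict Int Int) :=
  let prev := et.getD (i-1) PySem.Dict.empty
  let cur := et.getD i PySem.Dict.empty
  let et1 :=
    if cur.contains c then
      et.insert i (cur.insert c (cur.getD c 0 + (-1) * prev.getD c 0))
    else
      et.insert i (cur.insert c ((-1) * prev.getD c 0))
  let prev1 := et1.getD (i-1) PySem.Dict.empty
  if prev1.contains (c+1) then
    let cur1 := et1.getD i PySem.Dict.empty
    et1.insert i (cur1.insert (c+1) (prev1.getD c 0))
  else
    let curc := et1.getD c PySem.Dict.empty
    et1.insert c (curc.insert (c+1) 1)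

def progAStep (et : PySem.Dict Int (PySem.Dict Int Int)) (i : Int) :
    PySem.Dict Int (PySem.Dict Int Int) :=
  let et' := et.insert i PySem.Dict.empty
  ((et'.getD (i-1) PySem.Dict.empty).keys).foldl (fun e c => progAInner e i c) et'

def progresiva (n : Int) : List (Int × List (Int × Int)) :=
  let init : PySem.Dict Int (PySem.Dict Int Int) :=
    PySem.Dict.ofList [(-1, PySem.Dict.ofList [(0, 1)])]
  let final := (PySem.List.pyRange 0 n 1).foldl progAStep init
  final.items.map (fun p => (p.1, p.2.items))

-- ===== PORT B =====
def progRow (i : Int) : List (Int × Int) :=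
  (((PySem.List.pyRange 0 (i+2) 1).foldl
      (fun (st : PySem.Dict Int Int × Int) k =>
        (st.1.insert k (if PySem.Int.mod (i + 1 - k) 2 == 0 then st.2 else -st.2),
         PySem.Int.floordiv (st.2 * (i + 1 - k)) (k + 1)))
      (PySem.Dict.empty, 1)).1).items

def progresiva_alt (n : Int) : List (Int × List (Int × Int)) :=
  let init : PySem.Dict Int (List (Int × Int)) := PySem.Dict.ofList [(-1, [(0, 1)])]
  ((PySem.List.pyRange 0 n 1).foldl (fun d i => d.insert i (progRow i)) init).items

-- ===== PRECONDITION & SPEC =====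
def Spec_progresiva (n : Int) (out : List (Int × List (Int × Int))) : Prop := out = progresiva_alt n
instance (n : Int) (out : List (Int × List (Int × Int))) : Decidable (Spec_progresiva n out) := by unfold Spec_progresiva; infer_instance

-- ===== CLAIM (what is proved, stated in full; the proofs are below) =====
def Claim_equal_progresiva : Prop := ∀ (n : Int), Dom_progresiva n → Spec_progresiva n (progresiva n)

-- ===== LEMMAS AND PROOFS =====
theorem get?_mk_append {κ ν : Type} [BEq κ] (l1 l2 : List (κ × ν)) (x : κ) :
    (PySem.Dict.mk (l1 ++ l2)).get? x = ((PySem.Dict.mk l1).get? x).or ((PySem.Dict.mk l2).get? x) := by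
  induction l1 with
  | nil => simp [PySem.Dict.get?]
  | cons p l ih =>
    obtain ⟨k, v⟩ := p
    rw [List.cons_append, PySem.Dict.get?_mk_cons, PySem.Dict.get?_mk_cons]
    split <;> simp [ih]

theorem get?_mk_nil {ν : Type} (x : Int) : (PySem.Dict.mk ([] : List (Int × ν))).get? x = none := rfl

theorem get?_mk_range {ν : Type} (t : Nat) (f : Nat → ν) (x : Int) :
    (PySem.Dict.mk ((List.range t).map (fun (k : Nat) => ((k : Int), f k)))).get? x
      = if 0 ≤ x ∧ x < t then some (f x.toNat) else none := by
  induction t with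
  | zero =>
    rw [List.range_zero, List.map_nil, get?_mk_nil]
    have : ¬(0 ≤ x ∧ x < (0:Nat)) := by omega
    simp
  | succ t ih =>
    rw [List.range_succ, List.map_append, get?_mk_append, ih]
    simp only [List.map_cons, List.map_nil, PySem.Dict.get?_mk_cons]
    by_cases h1 : 0 ≤ x ∧ x < t
    · have h2 : (0 ≤ x ∧ x < ((t+1:Nat):Int)) := by push_cast; omega
      simp [h1]; omega
    · by_cases h2 : x = t
      · subst h2
        have h3 : (0 ≤ (t:Int) ∧ (t:Int) < ((t+1:Nat):Int)) := by push_cast; omega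
        simp [h3]
      · have h3 : ¬(0 ≤ x ∧ x < ((t+1:Nat):Int)) := by push_cast at h1 ⊢; omega
        have h4 : ((t:Int) = x) = False := by simp; omega
        simp [h1, h4, get?_mk_nil]; omega

def sRow (m : Nat) : List (Int × Int) :=
  (List.range (m+1)).map (fun (k : Nat) => ((k : Int), (-1 : Int)^(m-k) * (Nat.choose m k : Int)))

def eDict : Nat → PySem.Dict Int (PySem.Dict Int Int)
  | 0 => PySem.Dict.mk [(-1, PySem.Dict.mk (sRow 0))]
  | m+1 => (eDict m).insert (m : Int) (PySem.Dict.mk (sRow (m+1)))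

theorem get?_eDict (m : Nat) (j : Int) :
    (eDict m).get? j = if -1 ≤ j ∧ j < m then some (PySem.Dict.mk (sRow (j+1).toNat)) else none := by
  induction m with
  | zero =>
    rw [show eDict 0 = PySem.Dict.mk [(-1, PySem.Dict.mk (sRow 0))] from rfl,
        PySem.Dict.get?_mk_cons]
    by_cases h : j = -1
    · subst h; simp
    · have h2 : ((-1 : Int) == j) = false := by simp; omega
      have h3 : ¬(-1 ≤ j ∧ j < (0:Nat)) := by omega
      simp [h2, h3, get?_mk_nil]; omega
  | succ m ih =>
    rw [show eDict (m+1) = (eDict m).insert (m : Int) (PySem.Dict.mk (sRow (m+1))) from rfl,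
        PySem.Dict.get?_insert, ih]
    by_cases h : j = m
    · subst h
      have h2 : (-1 ≤ (m:Int) ∧ (m:Int) < ((m+1:Nat):Int)) := by push_cast; omega
      have h3 : ((m:Int)+1).toNat = m+1 := by omega
      simp [h2, h3]
    · by_cases h1 : -1 ≤ j ∧ j < m
      · have h2 : (-1 ≤ j ∧ j < ((m+1:Nat):Int)) := by push_cast; omega
        simp [h, h1, h2]; omega
      · have h2 : ¬(-1 ≤ j ∧ j < ((m+1:Nat):Int)) := by push_cast at h1 ⊢; omega
        simp [h, h1, h2]; omega

theorem contains_eDict_self (m : Nat) : (eDict m).contains (m : Int) = false := by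
  rw [PySem.Dict.contains_eq_isSome_get?, get?_eDict]
  have : ¬(-1 ≤ (m:Int) ∧ (m:Int) < m) := by omega
  simp [this]

theorem items_eDict (m : Nat) :
    (eDict m).items = (-1, PySem.Dict.mk (sRow 0)) ::
      (List.range m).map (fun (i : Nat) => ((i : Int), PySem.Dict.mk (sRow (i+1)))) := by
  induction m with
  | zero => rfl
  | succ m ih =>
    rw [show eDict (m+1) = (eDict m).insert (m : Int) (PySem.Dict.mk (sRow (m+1))) from rfl,
        PySem.Dict.items_insert_of_not_contains _ _ (contains_eDict_self m), ih,
        List.range_succ]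
    simp

def pRow (m c : Nat) : List (Int × Int) :=
  (List.range (c+1)).map (fun (k : Nat) => ((k : Int), (-1 : Int)^(m+1-k) * (Nat.choose (m+1) k : Int)))
    ++ [(((c+1 : Nat) : Int), (-1 : Int)^(m-c) * (Nat.choose m c : Int))]

theorem pRow_last (m : Nat) : pRow m m = sRow (m+1) := by
  rw [pRow, sRow]
  conv_rhs => rw [List.range_succ, List.map_append]
  refine congrArg₂ (fun (a b : List (Int × Int)) => a ++ b) rfl ?_
  simp [Nat.choose_self]

-- helper lemmas
theorem insert_mk_fresh {ν : Type} (d : PySem.Dict Int ν) (k : Int) (v : ν)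
    (h : d.contains k = false) : d.insert k v = PySem.Dict.mk (d.items ++ [(k, v)]) := by
  apply PySem.Dict.ext
  rw [PySem.Dict.items_insert_of_not_contains _ _ h]

theorem insert_mk_over {ν : Type} (d : PySem.Dict Int ν) (k : Int) (v : ν)
    (h : d.contains k = true) :
    d.insert k v = PySem.Dict.mk (d.items.map (fun p => if p.1 == k then (k, v) else p)) := by
  apply PySem.Dict.ext
  rw [PySem.Dict.items_insert_of_contains _ _ h]

theorem get?_sRow (m : Nat) (x : Int) :
    (PySem.Dict.mk (sRow m)).get? x
      = if 0 ≤ x ∧ x < m+1 then some ((-1 : Int)^(m-x.toNat) * (Nat.choose m x.toNat : Int)) else none := by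
  rw [sRow, get?_mk_range (m+1) (fun k => (-1 : Int)^(m-k) * (Nat.choose m k : Int))]
  have : ((m+1 : Nat) : Int) = (m : Int) + 1 := by push_cast; ring
  rw [this]

theorem prevLookup (m : Nat) (P : PySem.Dict Int Int) :
    (((eDict m).insert (m : Int) P).getD ((m : Int)-1) PySem.Dict.empty)
      = PySem.Dict.mk (sRow m) := by
  rw [PySem.Dict.getD_eq_get?_getD, PySem.Dict.get?_insert, get?_eDict]
  have h1 : ¬((m : Int) - 1 = (m : Int)) := by omega
  have h2 : -1 ≤ (m : Int) - 1 ∧ (m : Int) - 1 < m := by omega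
  have h3 : ((m : Int) - 1 + 1).toNat = m := by omega
  simp [h1, h2, h3]

theorem curD {ν : Type} (d : PySem.Dict Int ν) (k : Int) (v : ν) (dflt : ν) :
    ((d.insert k v).getD k dflt) = v := by
  rw [PySem.Dict.getD_eq_get?_getD, PySem.Dict.get?_insert_self]
  rfl

theorem signPascal (m c : Nat) (h : c + 1 ≤ m) :
    (-1 : Int)^(m-c) * (Nat.choose m c : Int)
      + (-1) * ((-1 : Int)^(m-(c+1)) * (Nat.choose m (c+1) : Int))
      = (-1 : Int)^(m+1-(c+1)) * (Nat.choose (m+1) (c+1) : Int) := by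
  have h1 : m - c = (m - (c+1)) + 1 := by omega
  have h2 : m + 1 - (c+1) = (m - (c+1)) + 1 := by omega
  rw [h1, h2, Nat.choose_succ_succ (m) (c)]
  push_cast
  ring

theorem inner_step_zero (m : Nat) :
    progAInner ((eDict m).insert (m : Int) PySem.Dict.empty) (m : Int) ((0 : Nat) : Int)
      = (eDict m).insert (m : Int) (PySem.Dict.mk (pRow m 0)) := by
  rcases Nat.eq_zero_or_pos m with hm | hm
  · subst hm; decide
  · have hg0 : (PySem.Dict.mk (sRow m)).getD 0 0 = (-1 : Int)^(m-0) * (Nat.choose m 0 : Int) := by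
      rw [PySem.Dict.getD_eq_get?_getD, get?_sRow]
      have : (0 : Int) ≤ 0 ∧ (0 : Int) < m+1 := by omega
      simp [this]
    have hc1 : (PySem.Dict.mk (sRow m)).contains 1 = true := by
      rw [PySem.Dict.contains_eq_isSome_get?, get?_sRow]
      have : (0 : Int) ≤ 1 ∧ (1 : Int) < m+1 := by omega
      simp [this]
    simp only [progAInner, prevLookup, curD, Nat.cast_zero, zero_add,
      PySem.Dict.contains_empty, Bool.false_eq_true, if_false, if_true, hg0, hc1,
      PySem.Dict.insert_insert_self]
    apply congrArg
    apply PySem.Dict.ext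
    rw [PySem.Dict.items_insert_of_not_contains, PySem.Dict.items_insert_of_not_contains]
    · simp [pRow, pow_succ, PySem.Dict.empty]
    · simp
    · simp [PySem.Dict.contains_insert]

theorem get?_pRow (m c : Nat) (x : Int) :
    (PySem.Dict.mk (pRow m c)).get? x =
      if 0 ≤ x ∧ x < ((c+1 : Nat) : Int) then
        some ((-1 : Int)^(m+1-x.toNat) * (Nat.choose (m+1) x.toNat : Int))
      else if x = ((c+1 : Nat) : Int) then
        some ((-1 : Int)^(m-c) * (Nat.choose m c : Int))
      else none := by
  rw [pRow, get?_mk_append,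
      get?_mk_range (c+1) (fun k => (-1 : Int)^(m+1-k) * (Nat.choose (m+1) k : Int)),
      PySem.Dict.get?_mk_cons]
  by_cases h1 : 0 ≤ x ∧ x < ((c+1 : Nat) : Int)
  · have h0 : 0 ≤ x := h1.1
    have h1' : x ≤ (c : Int) := by
      have := h1.2; push_cast at this; omega
    simp [h0, h1']
  · by_cases h2 : x = ((c+1 : Nat) : Int)
    · subst h2; simp [h1]
    · have ha : ¬(0 ≤ x ∧ x ≤ (c : Int)) := by push_cast at h1; omega
      have hb : ¬((c : Int) + 1 = x) := by push_cast at h2; omega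
      have hc' : ¬(x = (c : Int) + 1) := by omega
      simp [ha, hb, hc', get?_mk_nil]

theorem mapRange_succ_last (t : Nat) (f : Nat → Int) :
    (List.range t).map (fun (k : Nat) => ((k : Int), f k)) ++ [((t : Int), f t)]
      = (List.range (t+1)).map (fun (k : Nat) => ((k : Int), f k)) := by
  conv_rhs => rw [List.range_succ]
  simp

theorem inner_step_succ (m c : Nat) (hc : c + 1 ≤ m) :
    progAInner ((eDict m).insert (m : Int) (PySem.Dict.mk (pRow m c))) (m : Int) (((c+1 : Nat)) : Int)
      = (eDict m).insert (m : Int) (PySem.Dict.mk (pRow m (c+1))) := by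
  have hcontains : (PySem.Dict.mk (pRow m c)).contains ((c+1 : Nat) : Int) = true := by
    rw [PySem.Dict.contains_eq_isSome_get?, get?_pRow]
    have h1 : ¬(0 ≤ ((c+1 : Nat) : Int) ∧ ((c+1 : Nat) : Int) < ((c+1 : Nat) : Int)) := by omega
    simp [h1]
  have hgetcur : (PySem.Dict.mk (pRow m c)).getD ((c+1 : Nat) : Int) 0
      = (-1 : Int)^(m-c) * (Nat.choose m c : Int) := by
    rw [PySem.Dict.getD_eq_get?_getD, get?_pRow]
    have h1 : ¬(0 ≤ ((c+1 : Nat) : Int) ∧ ((c+1 : Nat) : Int) < ((c+1 : Nat) : Int)) := by omega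
    simp [h1]
  have hprevget : (PySem.Dict.mk (sRow m)).getD ((c+1 : Nat) : Int) 0
      = (-1 : Int)^(m-(c+1)) * (Nat.choose m (c+1) : Int) := by
    rw [PySem.Dict.getD_eq_get?_getD, get?_sRow]
    have h1 : (0 : Int) ≤ ((c+1 : Nat) : Int) ∧ ((c+1 : Nat) : Int) < m+1 := by
      constructor
      · omega
      · push_cast; omega
    have h2 : (((c+1 : Nat) : Int)).toNat = c+1 := by omega
    have h4 : (0 : Int) ≤ (c : Int) + 1 := by omega
    have h5 : c < m := by omega
    simp [h1, h2, h4, h5]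
  have hins : (PySem.Dict.mk (pRow m c)).insert ((c+1 : Nat) : Int)
        ((-1 : Int)^(m-c) * (Nat.choose m c : Int)
          + (-1) * ((-1 : Int)^(m-(c+1)) * (Nat.choose m (c+1) : Int)))
      = PySem.Dict.mk ((List.range (c+2)).map
          (fun (k : Nat) => ((k : Int), (-1 : Int)^(m+1-k) * (Nat.choose (m+1) k : Int)))) := by
    rw [insert_mk_over _ _ _ hcontains]
    apply PySem.Dict.ext
    show (pRow m c).map _ = _
    rw [pRow, List.map_append]
    have hpre : (((List.range (c+1)).map
          (fun (k : Nat) => ((k : Int), (-1 : Int)^(m+1-k) * (Nat.choose (m+1) k : Int)))).map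
          (fun p => if p.1 == ((c+1 : Nat) : Int) then (((c+1 : Nat) : Int),
            (-1 : Int)^(m-c) * (Nat.choose m c : Int)
              + (-1) * ((-1 : Int)^(m-(c+1)) * (Nat.choose m (c+1) : Int))) else p))
        = (List.range (c+1)).map
          (fun (k : Nat) => ((k : Int), (-1 : Int)^(m+1-k) * (Nat.choose (m+1) k : Int))) := by
      rw [List.map_map]
      apply List.map_congr_left
      intro k hk
      have hklt : k < c+1 := List.mem_range.mp hk
      have hne : ¬((k : Int) = (c : Int) + 1) := by push_cast; omega
      simp [hne]
    rw [hpre]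
    have hlast : (([(((c+1 : Nat) : Int), (-1 : Int)^(m-c) * (Nat.choose m c : Int))]).map
          (fun p => if p.1 == ((c+1 : Nat) : Int) then (((c+1 : Nat) : Int),
            (-1 : Int)^(m-c) * (Nat.choose m c : Int)
              + (-1) * ((-1 : Int)^(m-(c+1)) * (Nat.choose m (c+1) : Int))) else p))
        = [(((c+1 : Nat) : Int), (-1 : Int)^(m+1-(c+1)) * (Nat.choose (m+1) (c+1) : Int))] := by
      have hsp := signPascal m c hc
      simp only [neg_one_mul] at hsp
      simp [hsp]
    rw [hlast, show ((c+2 : Nat)) = (c+1)+1 from rfl, mapRange_succ_last]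
  simp only [progAInner, prevLookup, curD, hcontains, if_true, hgetcur, hprevget, hins,
    PySem.Dict.insert_insert_self]
  by_cases hlt : c + 1 < m
  · have hc2 : (PySem.Dict.mk (sRow m)).contains (((c+1 : Nat) : Int) + 1) = true := by
      rw [PySem.Dict.contains_eq_isSome_get?, get?_sRow]
      have h1 : (0 : Int) ≤ ((c+1 : Nat) : Int) + 1 ∧ ((c+1 : Nat) : Int) + 1 < m+1 := by
        constructor
        · omega
        · push_cast; omega
      simp [h1] <;> omega
    have hfresh : (PySem.Dict.mk ((List.range (c+2)).map
          (fun (k : Nat) => ((k : Int), (-1 : Int)^(m+1-k) * (Nat.choose (m+1) k : Int))))).contains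
          (((c+1 : Nat) : Int) + 1) = false := by
      rw [PySem.Dict.contains_eq_isSome_get?,
          get?_mk_range (c+2) (fun k => (-1 : Int)^(m+1-k) * (Nat.choose (m+1) k : Int))]
      have h1 : ¬(0 ≤ ((c+1 : Nat) : Int) + 1 ∧ ((c+1 : Nat) : Int) + 1 < ((c+2 : Nat) : Int)) := by
        push_cast; omega
      simp [h1] <;> omega
    simp only [hc2, if_true, curD]
    apply congrArg
    apply PySem.Dict.ext
    rw [PySem.Dict.items_insert_of_not_contains _ _ hfresh]
    show _ ++ _ = pRow m (c+1)
    rw [pRow]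
    have : (((c+1 : Nat) : Int) + 1) = ((c+1+1 : Nat) : Int) := by push_cast; ring
    rw [this]
  · have hceq : c + 1 = m := by omega
    subst hceq
    have hc2 : (PySem.Dict.mk (sRow (c+1))).contains (((c+1 : Nat) : Int) + 1) = false := by
      rw [PySem.Dict.contains_eq_isSome_get?, get?_sRow]
      have h1 : ¬(0 ≤ ((c+1 : Nat) : Int) + 1 ∧ ((c+1 : Nat) : Int) + 1 < (c+1)+1) := by
        push_cast; omega
      simp [h1] <;> omega
    have hfresh : (PySem.Dict.mk ((List.range (c+2)).map
          (fun (k : Nat) => ((k : Int), (-1 : Int)^(c+1+1-k) * (Nat.choose (c+1+1) k : Int))))).contains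
          (((c+1 : Nat) : Int) + 1) = false := by
      rw [PySem.Dict.contains_eq_isSome_get?,
          get?_mk_range (c+2) (fun k => (-1 : Int)^(c+1+1-k) * (Nat.choose (c+1+1) k : Int))]
      have h1 : ¬(0 ≤ ((c+1 : Nat) : Int) + 1 ∧ ((c+1 : Nat) : Int) + 1 < ((c+2 : Nat) : Int)) := by
        push_cast; omega
      simp [h1] <;> omega
    simp only [hc2, Bool.false_eq_true, if_false, curD, PySem.Dict.insert_insert_self]
    apply congrArg
    apply PySem.Dict.ext
    rw [PySem.Dict.items_insert_of_not_contains _ _ hfresh]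
    show _ ++ _ = pRow (c+1) (c+1)
    rw [pRow]
    have h2 : (((c+1 : Nat) : Int) + 1) = ((c+1+1 : Nat) : Int) := by push_cast; ring
    have h3 : (-1 : Int)^(c+1-(c+1)) * (Nat.choose (c+1) (c+1) : Int) = 1 := by
      simp
    rw [h2, h3]

theorem innerFold (m : Nat) (c : Nat) (hc : c ≤ m) :
    (((List.range (c+1)).map (fun (k : Nat) => ((k : Nat) : Int))).foldl
        (fun e k => progAInner e (m : Int) k) ((eDict m).insert (m : Int) PySem.Dict.empty))
      = (eDict m).insert (m : Int) (PySem.Dict.mk (pRow m c)) := by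
  induction c with
  | zero =>
    rw [show (0+1) = 1 from rfl, List.range_one]
    simp only [List.map_cons, List.map_nil, List.foldl_cons, List.foldl_nil]
    exact inner_step_zero m
  | succ c ih =>
    rw [List.range_succ, List.map_append, List.foldl_append, ih (by omega)]
    simp only [List.map_cons, List.map_nil, List.foldl_cons, List.foldl_nil]
    exact inner_step_succ m c hc

theorem keys_sRow (m : Nat) :
    (PySem.Dict.mk (sRow m)).keys = (List.range (m+1)).map (fun (k : Nat) => ((k : Nat) : Int)) := by
  show (sRow m).map Prod.fst = _
  rw [sRow, List.map_map]
  rfl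

theorem stepA (m : Nat) : progAStep (eDict m) (m : Int) = eDict (m+1) := by
  show ((((eDict m).insert (m : Int) PySem.Dict.empty).getD ((m : Int)-1) PySem.Dict.empty).keys).foldl
      (fun e c => progAInner e (m : Int) c) ((eDict m).insert (m : Int) PySem.Dict.empty) = eDict (m+1)
  rw [prevLookup, keys_sRow, innerFold m m (le_refl m), pRow_last]
  rfl

theorem foldA (m : Nat) :
    (((List.range m).map (fun (k : Nat) => ((k : Nat) : Int))).foldl progAStep
        (PySem.Dict.ofList [(-1, PySem.Dict.ofList [(0, 1)])])) = eDict m := by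
  induction m with
  | zero => decide
  | succ m ih =>
    rw [List.range_succ, List.map_append, List.foldl_append, ih]
    simp only [List.map_cons, List.map_nil, List.foldl_cons, List.foldl_nil]
    exact stepA m

theorem signIf (a : Nat) (c : Int) :
    (if PySem.Int.mod ((a : Nat) : Int) 2 == 0 then c else -c) = (-1 : Int)^a * c := by
  rw [PySem.Int.mod_eq_emod_of_pos (by omega : (0:Int) < 2)]
  rcases Nat.even_or_odd a with h | h
  · have h0 : ((a : Int)) % 2 = 0 := by
      have := Nat.even_iff.mp h; omega
    simp [h0, h.neg_one_pow]
  · have h0 : ¬(((a : Int)) % 2 = 0) := by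
      have := Nat.odd_iff.mp h; omega
    simp [h0, h.neg_one_pow]

theorem divStep (j t : Nat) (ht : t ≤ j+1) :
    PySem.Int.floordiv ((Nat.choose (j+1) t : Int) * ((j : Int) + 1 - (t : Int))) ((t : Int) + 1)
      = (Nat.choose (j+1) (t+1) : Int) := by
  have h1 : ((j : Int) + 1 - (t : Int)) = ((j+1-t : Nat) : Int) := by push_cast; omega
  rw [h1, show ((t : Int) + 1) = ((t+1 : Nat) : Int) by push_cast; ring,
      ← Nat.cast_mul, PySem.Int.floordiv_natCast]
  have h2 : Nat.choose (j+1) t * (j+1-t) / (t+1) = Nat.choose (j+1) (t+1) := by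
    rw [← Nat.choose_succ_right_eq, Nat.mul_div_cancel _ (by omega : 0 < t+1)]
  exact_mod_cast h2

theorem rowFold (j t : Nat) (ht : t ≤ j+2) :
    (((List.range t).map (fun (k : Nat) => ((k : Nat) : Int))).foldl
        (fun (st : PySem.Dict Int Int × Int) k =>
          (st.1.insert k (if PySem.Int.mod ((j : Int) + 1 - k) 2 == 0 then st.2 else -st.2),
           PySem.Int.floordiv (st.2 * ((j : Int) + 1 - k)) (k + 1)))
        (PySem.Dict.empty, 1))
      = (PySem.Dict.mk ((List.range t).map
            (fun (k : Nat) => ((k : Int), (-1 : Int)^(j+1-k) * (Nat.choose (j+1) k : Int)))),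
         (Nat.choose (j+1) t : Int)) := by
  induction t with
  | zero =>
    simp [PySem.Dict.empty]
  | succ t ih =>
    rw [List.range_succ, List.map_append, List.foldl_append, ih (by omega)]
    simp only [List.map_cons, List.map_nil, List.foldl_cons, List.foldl_nil]
    have hfresh : (PySem.Dict.mk ((List.range t).map
          (fun (k : Nat) => ((k : Int), (-1 : Int)^(j+1-k) * (Nat.choose (j+1) k : Int))))).contains
          ((t : Nat) : Int) = false := by
      rw [PySem.Dict.contains_eq_isSome_get?,
          get?_mk_range t (fun k => (-1 : Int)^(j+1-k) * (Nat.choose (j+1) k : Int))]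
      have h1 : ¬(0 ≤ ((t : Nat) : Int) ∧ ((t : Nat) : Int) < (t : Nat)) := by omega
      simp [h1]
    have hsign : ((j : Int) + 1 - ((t : Nat) : Int)) = ((j+1-t : Nat) : Int) := by
      push_cast; omega
    refine Prod.ext ?_ ?_
    · show (PySem.Dict.mk _).insert _ _ = _
      rw [insert_mk_fresh _ _ _ hfresh]
      apply PySem.Dict.ext
      show _ ++ _ = _
      rw [hsign, signIf (j+1-t) (Nat.choose (j+1) t : Int), mapRange_succ_last, List.range_succ]
    · show PySem.Int.floordiv _ _ = _
      exact divStep j t (by omega)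

theorem progRow_eq (j : Nat) : progRow ((j : Nat) : Int) = sRow (j+1) := by
  rw [progRow, PySem.List.pyRange_one]
  have h1 : (((j : Nat) : Int) + 2 - 0).toNat = j + 2 := by omega
  rw [h1]
  have h2 : (List.range (j+2)).map (fun k => (0 : Int) + (k : Nat)) =
      (List.range (j+2)).map (fun (k : Nat) => ((k : Nat) : Int)) := by
    simp
  rw [h2, rowFold j (j+2) (le_refl _)]
  rfl

theorem progresiva_eq (n : Int) : progresiva n = progresiva_alt n := by
  rw [progresiva, progresiva_alt, PySem.List.pyRange_one]
  have h2 : (List.range ((n - 0).toNat)).map (fun k => (0 : Int) + (k : Nat)) =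
      (List.range ((n - 0).toNat)).map (fun (k : Nat) => ((k : Nat) : Int)) := by
    simp
  rw [h2, foldA, items_eDict]
  have hfresh : ∀ a ∈ (List.range ((n - 0).toNat)).map (fun (k : Nat) => ((k : Nat) : Int)),
      (PySem.Dict.ofList [((-1 : Int), [((0 : Int), (1 : Int))])]).contains a = false := by
    intro a ha
    obtain ⟨k, _, rfl⟩ := List.mem_map.mp ha
    show (PySem.Dict.mk [((-1 : Int), [((0 : Int), (1 : Int))])]).contains _ = false
    rw [PySem.Dict.contains_eq_isSome_get?, PySem.Dict.get?_mk_cons]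
    have : ((-1 : Int) == ((k : Nat) : Int)) = false := by simp
    simp [this, get?_mk_nil]
  have hnd : (((List.range ((n - 0).toNat)).map (fun (k : Nat) => ((k : Nat) : Int))).map
      (fun a => a)).Nodup := by
    simp only [List.map_id']
    exact (List.nodup_range).map (fun a b h => by exact_mod_cast h)
  rw [PySem.Dict.items_foldl_insert_fresh _ (fun a => a) (fun a => progRow a) _ hfresh hnd]
  show _ = [((-1 : Int), [((0 : Int), (1 : Int))])] ++ _
  rw [List.map_cons, List.map_map, List.map_map]
  refine congrArg₂ (fun (a : (Int × List (Int × Int))) (b : List (Int × List (Int × Int))) => a :: b) ?_ ?_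
  · rfl
  · apply List.map_congr_left
    intro k hk
    show (((k : Nat) : Int), (PySem.Dict.mk (sRow (k+1))).items) = (((k : Nat) : Int), progRow ((k : Nat) : Int))
    rw [progRow_eq]

-- ===== VERDICT (by name: the statement is the Claim_ definition above) =====
theorem progresiva_spec : Claim_equal_progresiva := by
  intro n _
  exact progresiva_eq n
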